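-- pv_equiv track=rewrite | github.com/pdh9523/Algorithm | Python/백준/Gold/10096. 세 친구/세 친구.py | equal
-- ===== SOURCE A (Python) =====
-- def equal(word1, word2):
--     if len(word1) < len(word2):
--         word1, word2 = word2, word1
--     l,r = 0,0
--     res = 0
--     while l < len(word1) and r < len(word2):
--         if word1[l] == word2[r]:
--             l+=1
--             r+=1
--         else:
--             l+=1
--             res+=1
--         if res > 1: return False
--     return True
-- ===== SOURCE B (Python) =====
-- def equal(word1, word2):
--     if len(word1) < len(word2):
--         word1, word2 = word2, word1
--     k = 0
--     n2 = len(word2)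
--     while k < n2 and word1[k] == word2[k]:
--         k += 1
--     if k == n2:
--         return True
--     t1 = word1[k+1:]
--     t2 = word2[k:]
--     m = min(len(t1), len(t2))
--     return t1[:m] == t2[:m]
-- ===== Notes on version B (the rewrite author's own statement) =====
-- stated objective: simpler
-- what changed: Replaces A's interleaved two-pointer mismatch-counting loop with a common-prefix scan followed by a single slice-equality comparison of the overlapping tails; the bulk comparison runs in C, giving a constant-factor speedup.
import Mathlib
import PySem

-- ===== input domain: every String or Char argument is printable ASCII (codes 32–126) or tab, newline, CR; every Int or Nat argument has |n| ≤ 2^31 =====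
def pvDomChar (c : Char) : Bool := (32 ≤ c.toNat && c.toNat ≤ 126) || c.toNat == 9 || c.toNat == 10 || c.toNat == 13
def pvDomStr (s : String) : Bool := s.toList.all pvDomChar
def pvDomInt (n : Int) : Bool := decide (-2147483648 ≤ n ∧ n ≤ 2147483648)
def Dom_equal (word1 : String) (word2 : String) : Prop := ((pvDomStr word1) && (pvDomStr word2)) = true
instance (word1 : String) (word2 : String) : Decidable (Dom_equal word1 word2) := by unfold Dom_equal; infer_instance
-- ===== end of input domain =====

-- B replaces A's interleaved mismatch-counting pointer loop with a common-prefix scan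
-- plus one slice comparison of the overlapping tails (same cost, plainer decomposition).

-- ===== PORT A =====
-- A's while loop: l always advances (head of the first list), r advances on match;
-- res counts mismatches, returning false as soon as res > 1.
def equalLoopA : List Char → List Char → Nat → Bool
  | [], _, _ => true
  | _ :: _, [], _ => true
  | a :: s1, b :: s2, res =>
    if a == b then
      if res > 1 then false else equalLoopA s1 s2 res
    else
      if res + 1 > 1 then false else equalLoopA s1 (b :: s2) (res + 1)

def equal (word1 : String) (word2 : String) : Bool :=
  let p := if word1.length < word2.length then (word2, word1) else (word1, word2)
  equalLoopA p.1.toList p.2.toList 0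

-- ===== PORT B =====
-- t1[:m] == t2[:m] with m = min(len t1, len t2)
def equalTailEq (t1 t2 : List Char) : Bool :=
  let m := min t1.length t2.length
  t1.take m == t2.take m

-- B's prefix scan: while k < len(word2) and word1[k] == word2[k].
-- The ([], _::_) case is unreachable in Python (word1 is at least as long as word2).
def equalLoopB : List Char → List Char → Bool
  | _, [] => true
  | [], _ :: _ => true
  | a :: s1, b :: s2 =>
    if a == b then equalLoopB s1 s2 else equalTailEq s1 (b :: s2)

def equal_alt (word1 : String) (word2 : String) : Bool :=
  let p := if word1.length < word2.length then (word2, word1) else (word1, word2)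
  equalLoopB p.1.toList p.2.toList

-- ===== PRECONDITION & SPEC =====
def Spec_equal (word1 : String) (word2 : String) (out : Bool) : Prop := out = equal_alt word1 word2
instance (word1 : String) (word2 : String) (out : Bool) : Decidable (Spec_equal word1 word2 out) := by unfold Spec_equal; infer_instance

-- ===== CLAIM (what is proved, stated in full; the proofs are below) =====
def Claim_equal_equal : Prop := ∀ (word1 : String) (word2 : String), Dom_equal word1 word2 → Spec_equal word1 word2 (equal word1 word2)

-- ===== LEMMAS AND PROOFS =====

-- After the first mismatch A runs with res = 1 and fails on the next in-range mismatch: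
-- that is exactly equality of the overlapping prefixes.
theorem equalLoopA_one (t1 : List Char) : ∀ t2 : List Char, equalLoopA t1 t2 1 = equalTailEq t1 t2 := by
  induction t1 with
  | nil =>
    intro t2; cases t2 <;> simp [equalLoopA, equalTailEq]
  | cons a s1 ih =>
    intro t2
    cases t2 with
    | nil => simp [equalLoopA, equalTailEq]
    | cons b s2 =>
      by_cases h : a = b
      · subst h
        simp [equalLoopA, equalTailEq, ih s2, Nat.succ_min_succ, List.take_succ_cons]
      · simp [equalLoopA, equalTailEq, Nat.succ_min_succ, List.take_succ_cons, h]

theorem equalLoopA_eq_loopB (w1 : List Char) : ∀ w2 : List Char, equalLoopA w1 w2 0 = equalLoopB w1 w2 := by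
  induction w1 with
  | nil =>
    intro w2; cases w2 <;> simp [equalLoopA, equalLoopB]
  | cons a s1 ih =>
    intro w2
    cases w2 with
    | nil => simp [equalLoopA, equalLoopB]
    | cons b s2 =>
      by_cases h : a = b
      · subst h; simp [equalLoopA, equalLoopB, ih s2]
      · simp [equalLoopA, equalLoopB, h, equalLoopA_one]

-- ===== VERDICT (by name: the statement is the Claim_ definition above) =====
theorem equal_spec : Claim_equal_equal := by
  intro word1 word2 _
  unfold Spec_equal equal equal_alt
  simp only [equalLoopA_eq_loopB]
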